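-- pv_equiv track=rewrite | github.com/CoralesS/Lab5_Algoritmos_Evolutivos | Ejercicio2.py | calcular_choques
-- ===== SOURCE A (Python) =====
-- def calcular_choques(asignacion):
--     # contar cuántos slots están asignados a más de un mentor
--     slot_ocupados = {}
--     choques = 0
--     for mentor, slot in asignacion.items():
--         if slot not in slot_ocupados:
--             slot_ocupados[slot] = 0
--         slot_ocupados[slot] += 1
--     for slot, count in slot_ocupados.items():
--         if count > 1:
--             choques += (count - 1)
--     return choques
-- ===== SOURCE B (Python) =====
-- def calcular_choques(asignacion):
--     # closed form: each slot with k mentors contributes k-1 collisions,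
--     # so total collisions = total assignments - number of distinct slots
--     return len(asignacion) - len(set(asignacion.values()))
-- ===== Notes on version B (the rewrite author's own statement) =====
-- stated objective: simpler
-- what changed: Replaced the two counting loops (build an occupancy dict, then sum count-1 over entries with count>1) by the telescoped closed form len(asignacion) - len(set(asignacion.values())).
import Mathlib
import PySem

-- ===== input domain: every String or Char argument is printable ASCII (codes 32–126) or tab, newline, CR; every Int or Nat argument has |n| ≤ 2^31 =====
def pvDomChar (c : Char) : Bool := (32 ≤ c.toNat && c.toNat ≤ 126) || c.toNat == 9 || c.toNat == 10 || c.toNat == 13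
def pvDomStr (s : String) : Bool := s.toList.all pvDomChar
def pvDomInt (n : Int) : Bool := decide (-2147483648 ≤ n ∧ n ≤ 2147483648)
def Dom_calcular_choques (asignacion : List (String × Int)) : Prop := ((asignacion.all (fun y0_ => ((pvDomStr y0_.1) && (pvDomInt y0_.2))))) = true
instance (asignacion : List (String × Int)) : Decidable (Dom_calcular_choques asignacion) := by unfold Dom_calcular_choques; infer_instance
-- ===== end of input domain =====

-- B replaces A's two counting loops by the telescoped closed form
-- len(asignacion) - len(set(asignacion.values())) (objective: simpler).

-- ===== PORT A =====
-- first loop: build slot_ocupados; second loop: sum (count - 1) over counts > 1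
def calcular_choques (asignacion : List (String × Int)) : Int :=
  let slot_ocupados : PySem.Dict Int Int :=
    asignacion.foldl
      (fun d p =>
        let d := if d.contains p.2 then d else d.insert p.2 0
        d.modify p.2 0 (· + 1))
      PySem.Dict.empty
  slot_ocupados.items.foldl
    (fun choques kc => if kc.2 > 1 then choques + (kc.2 - 1) else choques) 0

-- ===== PORT B =====
-- len(asignacion) - len(set(asignacion.values()))
def calcular_choques_alt (asignacion : List (String × Int)) : Int :=
  (asignacion.length : Int) - ((PySem.Set.ofList (asignacion.map (·.2))).length : Int)

-- ===== PRECONDITION & SPEC =====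
def Spec_calcular_choques (asignacion : List (String × Int)) (out : Int) : Prop := out = calcular_choques_alt asignacion
instance (asignacion : List (String × Int)) (out : Int) : Decidable (Spec_calcular_choques asignacion out) := by unfold Spec_calcular_choques; infer_instance

-- ===== CLAIM (what is proved, stated in full; the proofs are below) =====
def Claim_equal_calcular_choques : Prop := ∀ (asignacion : List (String × Int)), Dom_calcular_choques asignacion → Spec_calcular_choques asignacion (calcular_choques asignacion)

-- ===== LEMMAS AND PROOFS =====

-- a key absent from the dict looks up to the default
theorem getD_not_contains (d : PySem.Dict Int Int) (s : Int) (h : d.contains s = false) :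
    d.getD s 0 = 0 := by
  simp only [PySem.Dict.contains, List.any_eq_false, beq_iff_eq, Prod.forall, PySem.Dict.getD,
    PySem.Dict.get?] at h ⊢
  rw [List.find?_eq_none.mpr]
  · rfl
  · rintro ⟨a, b⟩ hm
    simpa using h a b hm

-- A's "insert 0 if absent, then += 1" is exactly Counter's modify step
theorem step_eq (d : PySem.Dict Int Int) (s : Int) :
    (if d.contains s then d else d.insert s 0).modify s 0 (· + 1) = d.modify s 0 (· + 1) := by
  by_cases h : d.contains s
  · simp [h]
  · simp only [h, Bool.false_eq_true, ite_false]
    simp only [PySem.Dict.modify]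
    rw [PySem.Dict.getD_insert_self, PySem.Dict.insert_insert_self,
        getD_not_contains d s (by simpa using h)]

-- A's second loop over (slot, count) pairs telescopes, since every count is ≥ 1
theorem foldl_collisions (vs : List Int) (S : List Int) (init : Int)
    (hmem : ∀ k ∈ S, 1 ≤ vs.count k) :
    (S.map (fun k => (k, (vs.count k : Int)))).foldl
        (fun c kc => if kc.2 > 1 then c + (kc.2 - 1) else c) init
      = init + ((S.map fun k => (vs.count k : Int)).sum - S.length) := by
  induction S generalizing init with
  | nil => simp
  | cons k S ih =>
    have h1 : 1 ≤ vs.count k := hmem k (by simp)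
    have := ih (init := if (vs.count k : Int) > 1 then init + ((vs.count k : Int) - 1) else init)
      (fun x hx => hmem x (by simp [hx]))
    simp only [List.map_cons, List.foldl_cons] at *
    rw [this]
    by_cases h : (vs.count k : Int) > 1 <;> simp [h, List.length_cons] <;> linarith [h1]

-- the counts over the distinct slots sum to the total number of assignments
theorem sum_counts (vs : List Int) :
    ((PySem.Set.ofList vs).map fun k => (vs.count k : Int)).sum = (vs.length : Int) := by
  have hperm : (PySem.Set.ofList vs).Perm vs.dedup :=
    (List.perm_ext_iff_of_nodup (PySem.Set.nodup_ofList vs) vs.nodup_dedup).mpr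
      (fun x => by rw [PySem.Set.mem_ofList, List.mem_dedup])
  rw [List.Perm.sum_eq (hperm.map _)]
  rw [show (vs.dedup.map fun k => (vs.count k : Int)) = (vs.dedup.map fun k => vs.count k).map Nat.cast by simp]
  rw [← Nat.cast_list_sum, List.sum_map_count_dedup_eq_length]

-- ===== VERDICT (by name: the statement is the Claim_ definition above) =====
theorem calcular_choques_spec : Claim_equal_calcular_choques := by
  intro asignacion _
  unfold Spec_calcular_choques calcular_choques calcular_choques_alt
  set vs := asignacion.map (·.2) with hvs
  have hfold : asignacion.foldl
      (fun d p =>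
        let d := if d.contains p.2 then d else d.insert p.2 0
        d.modify p.2 0 (· + 1))
      PySem.Dict.empty = PySem.Dict.counter vs := by
    rw [PySem.Dict.counter_eq_foldl, hvs, List.foldl_map]
    congr 1
    funext d p
    exact step_eq d p.2
  rw [hfold]
  simp only []
  rw [PySem.Dict.items_counter,
      foldl_collisions vs (PySem.Set.ofList vs) 0
        (fun k hk => List.count_pos_iff.mpr ((PySem.Set.mem_ofList vs k).mp hk)),
      sum_counts]
  simp [hvs]
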